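-- pv_equiv track=rewrite | github.com/Teriks/dgenerate | dgenerate/batchprocess/batchprocessor.py | _set_split
-- ===== SOURCE A (Python) =====
-- def _set_split(directive_args, line):
--     name_part = directive_args[1]
--     if not name_part.startswith('{{'):
--         return directive_args[1], directive_args[2]
--
--     # Handle the case where the name_part starts with '{{'
--     without_directive = line.split(None, 1)[1]
--     t_depth = 0
--     var_name = ''
--     value_part = ''
--     idx = 0
--     var_mode = True
--
--     while idx < len(without_directive):
--         char = without_directive[idx]
--         if var_mode:
--             var_name += char
--             if char == '{':
--                 t_depth += 1
--             elif char == '}':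
--                 t_depth -= 1
--             if t_depth == 0 and var_name.endswith('}}'):
--                 var_mode = False
--         else:
--             value_part += char
--         idx += 1
--
--     return var_name.strip(), value_part.strip()
-- ===== SOURCE B (Python) =====
-- def _find_split(rest):
--     # index of the first position after a balanced '}}' close; len(rest) if none
--     depth = 0
--     prev = ''
--     n = 0
--     for c in rest:
--         depth += (c == '{') - (c == '}')
--         n += 1
--         if depth == 0 and prev == '}' and c == '}':
--             return n
--         prev = c
--     return len(rest)
--
--
-- def _set_split(directive_args, line):
--     if not directive_args[1].startswith('{{'):
--         return directive_args[1], directive_args[2]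
--     rest = line.split(None, 1)[1]
--     k = _find_split(rest)
--     return rest[:k].strip(), rest[k:].strip()
-- ===== Notes on version B (the rewrite author's own statement) =====
-- stated objective: simpler
-- what changed: Instead of accumulating two output strings char-by-char inside a var_mode state machine, B computes only the split index with a small depth-tracking helper and obtains both parts by one slice and strip each.
import Mathlib
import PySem

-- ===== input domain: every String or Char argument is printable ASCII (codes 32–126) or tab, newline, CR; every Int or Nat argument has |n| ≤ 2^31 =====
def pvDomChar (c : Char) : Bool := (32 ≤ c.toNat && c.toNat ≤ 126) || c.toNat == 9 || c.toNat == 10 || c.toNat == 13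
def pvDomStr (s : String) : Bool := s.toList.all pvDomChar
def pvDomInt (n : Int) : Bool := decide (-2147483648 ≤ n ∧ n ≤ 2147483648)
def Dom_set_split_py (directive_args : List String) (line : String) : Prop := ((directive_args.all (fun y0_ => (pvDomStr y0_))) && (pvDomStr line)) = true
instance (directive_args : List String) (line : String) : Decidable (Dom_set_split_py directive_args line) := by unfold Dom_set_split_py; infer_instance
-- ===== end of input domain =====

-- B replaces A's char-by-char accumulation of both output strings in a var_mode
-- state machine by computing only the split index and slicing/stripping once; equivalence of return values is proved on Pre_ (inputs where A does not raise).

-- ===== PORT A =====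
-- A's while loop: state (remaining chars, t_depth, var_name, value_part, var_mode)
def setSplitLoopA : List Char → Int → List Char → List Char → Bool → List Char × List Char
  | [], _, vn, vp, _ => (vn, vp)
  | c :: cs, d, vn, vp, vm =>
    if vm then
      let vn' := vn ++ [c]
      let d' := if c = '{' then d + 1 else if c = '}' then d - 1 else d
      let vm' := if d' == 0 && PySem.Chars.endswith vn' ['}', '}'] then false else vm
      setSplitLoopA cs d' vn' vp vm'
    else
      setSplitLoopA cs d vn (vp ++ [c]) vm

def set_split_py (directive_args : List String) (line : String) : String × String :=
  let name_part := PySem.List.pyGetD directive_args 1 ""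
  if ¬ (PySem.Str.startswith name_part "{{" = true) then
    (PySem.List.pyGetD directive_args 1 "", PySem.List.pyGetD directive_args 2 "")
  else
    let without_directive := (PySem.List.pyGetD (PySem.Str.split₀Max line 1) 1 "").toList
    let r := setSplitLoopA without_directive 0 [] [] true
    (String.ofList (PySem.Chars.strip r.1), String.ofList (PySem.Chars.strip r.2))

-- ===== PORT B =====
-- B's _find_split: fold over the chars carrying (depth, prev); returns the split index
def setSplitFindB : List Char → Int → Option Char → Nat
  | [], _, _ => 0
  | c :: cs, d, prev =>
    let d' := d + (if c = '{' then 1 else 0) - (if c = '}' then 1 else 0)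
    if d' == 0 && prev == some '}' && c == '}' then 1
    else 1 + setSplitFindB cs d' (some c)

def set_split_py_alt (directive_args : List String) (line : String) : String × String :=
  let name_part := PySem.List.pyGetD directive_args 1 ""
  if ¬ (PySem.Str.startswith name_part "{{" = true) then
    (name_part, PySem.List.pyGetD directive_args 2 "")
  else
    let rest := (PySem.List.pyGetD (PySem.Str.split₀Max line 1) 1 "").toList
    let k := setSplitFindB rest 0 none
    (String.ofList (PySem.Chars.strip (rest.take k)), String.ofList (PySem.Chars.strip (rest.drop k)))

-- ===== PRECONDITION & SPEC =====
-- Pre_ excludes exactly the inputs where A raises IndexError: fewer than 2 directive args;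
-- name not starting '{{' with fewer than 3 args; or name starting '{{' while line has at most one whitespace-separated token.
def Pre_set_split_py (directive_args : List String) (line : String) : Prop :=
  2 ≤ directive_args.length ∧
  (if PySem.Str.startswith (directive_args.getD 1 "") "{{" then
      2 ≤ (PySem.Str.split₀Max line 1).length
    else 3 ≤ directive_args.length)
instance (directive_args : List String) (line : String) : Decidable (Pre_set_split_py directive_args line) := by unfold Pre_set_split_py; infer_instance

def pvWitness_set_split_py : List String × String := (["\\set", "{{x}}", "1"], "\\set {{x}} 1")

def Spec_set_split_py (directive_args : List String) (line : String) (out : String × String) : Prop := out = set_split_py_alt directive_args line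
instance (directive_args : List String) (line : String) (out : String × String) : Decidable (Spec_set_split_py directive_args line out) := by unfold Spec_set_split_py; infer_instance

-- ===== CLAIM (what is proved, stated in full; the proofs are below) =====
def Claim_equal_set_split_py : Prop := ∀ (directive_args : List String) (line : String), Dom_set_split_py directive_args line → Pre_set_split_py directive_args line → Spec_set_split_py directive_args line (set_split_py directive_args line)

-- ===== LEMMAS AND PROOFS =====

lemma cond_braces_eq (d' : Int) (vn : List Char) (c : Char) :
    (d' == 0 && PySem.Chars.endswith (vn ++ [c]) ['}', '}'])
      = (d' == 0 && vn.getLast? == some '}' && c == '}') := by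
  rw [Bool.and_assoc]
  rw [Bool.eq_iff_iff]
  simp only [Bool.and_eq_true, beq_iff_eq, PySem.Chars.endswith_iff]
  constructor
  · rintro ⟨hd, t, ht⟩
    refine ⟨hd, ?_⟩
    have h2 : (t ++ ['}']).concat '}' = vn.concat c := by
      simpa [List.concat_eq_append] using ht
    obtain ⟨h3, h4⟩ := List.concat_inj.mp h2
    subst h4
    refine ⟨?_, rfl⟩
    rw [← h3, List.getLast?_concat]
  · rintro ⟨hd, hl, rfl⟩
    obtain ⟨vs, rfl⟩ := List.getLast?_eq_some_iff.mp hl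
    exact ⟨hd, vs, by simp⟩

lemma loopA_false (cs : List Char) (d : Int) (vn vp : List Char) :
    setSplitLoopA cs d vn vp false = (vn, vp ++ cs) := by
  induction cs generalizing vp with
  | nil => simp [setSplitLoopA]
  | cons c cs ih => simp [setSplitLoopA, ih]

lemma loopA_eq_find (cs : List Char) (d : Int) (vn vp : List Char) :
    setSplitLoopA cs d vn vp true =
      (vn ++ cs.take (setSplitFindB cs d vn.getLast?),
       vp ++ cs.drop (setSplitFindB cs d vn.getLast?)) := by
  induction cs generalizing d vn with
  | nil => simp [setSplitLoopA, setSplitFindB]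
  | cons c cs ih =>
    rw [setSplitLoopA, setSplitFindB]
    have hd : (if c = '{' then d + 1 else if c = '}' then d - 1 else d)
        = d + (if c = '{' then 1 else 0) - (if c = '}' then 1 else 0) := by
      by_cases h1 : c = '{' <;> by_cases h2 : c = '}' <;> simp_all
    set d' := d + (if c = '{' then 1 else 0) - (if c = '}' then 1 else 0) with hd'
    rw [if_pos rfl] at *
    simp only [hd, cond_braces_eq]
    by_cases hcond : (d' == 0 && vn.getLast? == some '}' && c == '}') = true
    · rw [hcond, if_pos rfl, if_pos rfl, loopA_false]
      simp
    · rw [Bool.not_eq_true] at hcond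
      rw [hcond, if_neg (by simp), if_neg (by simp)]
      rw [ih d' (vn ++ [c])]
      simp [Nat.add_comm 1]

-- ===== VERDICT (by name: the statement is the Claim_ definition above) =====
theorem set_split_py_spec : Claim_equal_set_split_py := by
  intro directive_args line _ _
  unfold Spec_set_split_py set_split_py set_split_py_alt
  have H := loopA_eq_find ((PySem.List.pyGetD (PySem.Str.split₀Max line 1) 1 "").toList) 0 [] []
  simp only [List.getLast?_nil, List.nil_append] at H
  cases h : PySem.Str.startswith (PySem.List.pyGetD directive_args 1 "") "{{" with
  | false => simp at h; simp [h]
  | true => simp at h; simp [h, H]
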